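-- pv_equiv track=rewrite | github.com/Karapsin/Yandex_algo_training | HA5/E_test.py | slow_sol
-- ===== SOURCE A (Python) =====
-- def slow_sol(N, K, input_list):
--     best_res = N + 1
--     best_start = -1
--     best_end = -1
--     for i in range(K-1, N):
--         left = 0
--         right = i
--         while right < N:
--             if len(set(input_list[left:(right+1)])) == K:
--                 if (right - left) < best_res:
--                     best_res = right - left
--                     best_start = left + 1
--                     best_end = right + 1
--
--             left = left + 1
--             right = right + 1
--
--     return  (best_start, best_end)
-- ===== SOURCE B (Python) =====
-- def slow_sol(N, K, input_list):
--     # No window can contain more distinct values than the whole prefix input_list[:N],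
--     # so bail out immediately when K exceeds that (this also covers K > N).
--     if K > len(set(input_list[:N])):
--         return (-1, -1)
--     # For each left end, grow the window rightwards with an incremental set and
--     # stop at the FIRST right where the distinct count reaches K (distinct count
--     # is nondecreasing in right, so that is the shortest exactly-K window at this
--     # left).  Keep the shortest such window overall (strict '<' keeps the earliest
--     # left on ties, matching the lexicographic (length, start) minimum).
--     best_len = None
--     best_left = -1
--     for left in range(N):
--         seen = set()
--         for right in range(left, N):
--             seen.add(input_list[right])
--             if len(seen) == K:
--                 if best_len is None or (right - left) < best_len:
--                     best_len = right - left
--                     best_left = left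
--                 break
--     if best_len is None:
--         return (-1, -1)
--     return (best_left + 1, best_left + best_len + 1)
-- ===== Notes on version B (the rewrite author's own statement) =====
-- stated objective: alternative
-- what changed: Instead of A's triple loop that recomputes set(slice) for every (length, start) pair, B bails out when K exceeds the distinct count of input_list[:N] and otherwise scans once per left end, growing an incremental set rightwards and stopping at the first right where the distinct count reaches K, keeping the overall shortest window with earliest start.
-- outside the precondition, e.g. on slow_sol(2, 0, [5, 6]): A returns (1, 0), B returns (-1, -1); on slow_sol(3, 1, [1]): A returns (1, 1), B raises IndexError
import Mathlib
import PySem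

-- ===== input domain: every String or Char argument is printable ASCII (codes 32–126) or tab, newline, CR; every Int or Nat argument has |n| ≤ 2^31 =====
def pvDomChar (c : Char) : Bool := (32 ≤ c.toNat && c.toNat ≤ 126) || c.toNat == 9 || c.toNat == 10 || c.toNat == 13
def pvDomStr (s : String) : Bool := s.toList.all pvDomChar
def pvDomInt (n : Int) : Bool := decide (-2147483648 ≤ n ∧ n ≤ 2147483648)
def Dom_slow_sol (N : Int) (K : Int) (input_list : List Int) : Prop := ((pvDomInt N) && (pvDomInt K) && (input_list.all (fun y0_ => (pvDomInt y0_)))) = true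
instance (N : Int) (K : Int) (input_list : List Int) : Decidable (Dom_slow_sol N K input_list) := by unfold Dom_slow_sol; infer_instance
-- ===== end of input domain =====

-- B: instead of A's loop over all (length, start) windows recomputing set(slice) for each,
-- B bails out when K exceeds the distinct count of input_list[:N] and otherwise grows one
-- incremental set per left end, stopping at the first right that reaches K distinct values;
-- equality of the returned pair is proved on Pre_ (N ≤ len(input_list) and K ≠ 0).

-- ===== PORT A =====
def pvWhileA (fuel : Nat) (N K : Int) (input_list : List Int) (left right : Int)
    (st : Int × Int × Int) : Int × Int × Int :=
  match fuel with
  | 0 => st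
  | Nat.succ f =>
    if right < N then
      let st' :=
        if PySem.Set.len (PySem.Set.ofList (PySem.List.slice input_list (some left) (some (right + 1)))) = K then
          if right - left < st.1 then (right - left, left + 1, right + 1) else st
        else st
      pvWhileA f N K input_list (left + 1) (right + 1) st'
    else st

def slow_sol (N : Int) (K : Int) (input_list : List Int) : Int × Int :=
  let st := (PySem.List.pyRange (K - 1) N 1).foldl
    (fun st i => pvWhileA (N - i).toNat N K input_list 0 i st) (N + 1, -1, -1)
  (st.2.1, st.2.2)

-- ===== PORT B =====
def pvInnerB (K : Int) (input_list : List Int) (left : Int) (rights : List Int)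
    (seen : PySem.Set Int) (best : Option (Int × Int)) : Option (Int × Int) :=
  match rights with
  | [] => best
  | r :: rest =>
    let seen' := PySem.Set.add seen (PySem.List.pyGetD input_list r 0)
    if PySem.Set.len seen' = K then
      match best with
      | none => some (r - left, left)
      | some b => if r - left < b.1 then some (r - left, left) else some b
    else pvInnerB K input_list left rest seen' best

def slow_sol_alt (N : Int) (K : Int) (input_list : List Int) : Int × Int :=
  if K > PySem.Set.len (PySem.Set.ofList (PySem.List.slice input_list none (some N))) then (-1, -1)
  else match (PySem.List.pyRange 0 N 1).foldl
      (fun best l => pvInnerB K input_list l (PySem.List.pyRange l N 1) PySem.Set.empty best) none with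
  | none => (-1, -1)
  | some (len, left) => (left + 1, left + len + 1)

-- ===== PRECONDITION & SPEC =====
-- Pre_ restricts to the task's natural domain: N (the declared length) must not exceed
-- len(input_list) — beyond it A's slices silently truncate while B indexes and raises —
-- and the required distinct count K must be nonzero (for K = 0 A returns the
-- meaningless pair (1, 0) on any positive N).
def Pre_slow_sol (N : Int) (K : Int) (input_list : List Int) : Prop :=
  N ≤ (input_list.length : Int) ∧ K ≠ 0
instance (N : Int) (K : Int) (input_list : List Int) : Decidable (Pre_slow_sol N K input_list) := by
  unfold Pre_slow_sol; infer_instance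

def pvWitness_slow_sol : Int × Int × List Int := (3, 2, [1, 2, 1])

def Spec_slow_sol (N : Int) (K : Int) (input_list : List Int) (out : Int × Int) : Prop := out = slow_sol_alt N K input_list
instance (N : Int) (K : Int) (input_list : List Int) (out : Int × Int) : Decidable (Spec_slow_sol N K input_list out) := by unfold Spec_slow_sol; infer_instance

-- ===== CLAIM (what is proved, stated in full; the proofs are below) =====
def Claim_equal_slow_sol : Prop := ∀ (N : Int) (K : Int) (input_list : List Int), Dom_slow_sol N K input_list → Pre_slow_sol N K input_list → Spec_slow_sol N K input_list (slow_sol N K input_list)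

-- ===== LEMMAS AND PROOFS =====

-- distinct count of the window xs[l..r] (inclusive ends, Nat indices)
def dct (xs : List Int) (l r : Nat) : Nat :=
  (PySem.Set.ofList ((xs.drop l).take (r + 1 - l))).length

-- window [l, l+d] is inside [0, n) and has exactly k distinct values
def okW (xs : List Int) (k n d l : Nat) : Prop := l + d < n ∧ dct xs l (l + d) = k

def lexLE (p q : Nat × Nat) : Prop := p.1 < q.1 ∨ (p.1 = q.1 ∧ p.2 ≤ q.2)

-- r is the (length, start)-lexicographically least ok window among those satisfying P
def OptIn (xs : List Int) (k n : Nat) (P : Nat → Nat → Prop) (r : Option (Nat × Nat)) : Prop :=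
  (r = none ∧ ∀ d l, P d l → ¬ okW xs k n d l) ∨
  (∃ d l, r = some (d, l) ∧ P d l ∧ okW xs k n d l ∧
    ∀ d' l', P d' l' → okW xs k n d' l' → lexLE (d, l) (d', l'))

def stepA (xs : List Int) (k : Nat) (st : Int × Int × Int) (d l : Nat) : Int × Int × Int :=
  if dct xs l (l + d) = k then
    (if (d : Int) < st.1 then ((d : Int), (l : Int) + 1, (l : Int) + (d : Int) + 1) else st)
  else st

def stOf (N : Int) (r : Option (Nat × Nat)) : Int × Int × Int :=
  match r with
  | none => (N + 1, -1, -1)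
  | some (d, l) => ((d : Int), (l : Int) + 1, (l : Int) + (d : Int) + 1)

def outA (r : Option (Nat × Nat)) : Int × Int :=
  match r with
  | none => (-1, -1)
  | some (d, l) => ((l : Int) + 1, (l : Int) + (d : Int) + 1)

def updB (best : Option (Int × Int)) (c : Int × Int) : Option (Int × Int) :=
  match best with
  | none => some c
  | some b => if c.1 < b.1 then some c else some b

def bOf (r : Option (Nat × Nat)) : Option (Int × Int) :=
  r.map (fun p => ((p.1 : Int), (p.2 : Int)))

-- first r0 in [r, r+c) with dct xs l r0 = k
def findRF (xs : List Int) (k : Nat) (c l r : Nat) : Option Nat :=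
  match c with
  | 0 => none
  | Nat.succ c => if dct xs l r = k then some r else findRF xs k c l (r + 1)

def stepB (xs : List Int) (k n : Nat) (best : Option (Int × Int)) (l : Nat) : Option (Int × Int) :=
  match findRF xs k (n - l) l l with
  | none => best
  | some r0 => updB best (((r0 - l : Nat) : Int), (l : Int))

lemma dct_le (xs : List Int) (l r : Nat) : dct xs l r ≤ r + 1 - l := by
  unfold dct
  calc (PySem.Set.ofList ((xs.drop l).take (r + 1 - l))).length
      ≤ ((xs.drop l).take (r + 1 - l)).length := PySem.Set.length_ofList_le _
    _ ≤ r + 1 - l := by simp [List.length_take]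

lemma ok_k_le (xs : List Int) (k n d l : Nat) (h : okW xs k n d l) : k ≤ d + 1 := by
  obtain ⟨h1, h2⟩ := h
  have := dct_le xs l (l + d)
  omega

lemma window_succ (xs : List Int) (l r : Nat) (h1 : l ≤ r) (h2 : r < xs.length) :
    (xs.drop l).take (r + 1 - l) = (xs.drop l).take (r - l) ++ [xs[r]] := by
  rw [show r + 1 - l = (r - l) + 1 from by omega, List.take_succ]
  congr 1
  rw [List.getElem?_drop, show l + (r - l) = r from by omega]
  simp [List.getElem?_eq_getElem h2]

lemma OptIn_congr (xs : List Int) (k n : Nat) (P Q : Nat → Nat → Prop)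
    (h : ∀ d l, okW xs k n d l → (P d l ↔ Q d l)) (r : Option (Nat × Nat))
    (hr : OptIn xs k n P r) : OptIn xs k n Q r := by
  rcases hr with ⟨hr, hnone⟩ | ⟨d, l, hr, hP, hok, hmin⟩
  · exact Or.inl ⟨hr, fun d l hQ hok => hnone d l ((h d l hok).mpr hQ) hok⟩
  · exact Or.inr ⟨d, l, hr, (h d l hok).mp hP, hok,
      fun d' l' hQ hok' => hmin d' l' ((h d' l' hok').mpr hQ) hok'⟩

lemma OptIn_unique (xs : List Int) (k n : Nat) (P : Nat → Nat → Prop)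
    (r r' : Option (Nat × Nat)) (h : OptIn xs k n P r) (h' : OptIn xs k n P r') : r = r' := by
  rcases h with ⟨hr, hnone⟩ | ⟨d, l, hr, hP, hok, hmin⟩ <;>
    rcases h' with ⟨hr', hnone'⟩ | ⟨d', l', hr', hP', hok', hmin'⟩
  · rw [hr, hr']
  · exact absurd hok' (hnone d' l' hP')
  · exact absurd hok (hnone' d l hP)
  · have h1 := hmin d' l' hP' hok'
    have h2 := hmin' d l hP hok
    simp only [lexLE] at h1 h2
    have heq : d = d' ∧ l = l' := by omega
    rw [hr, hr', heq.1, heq.2]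

lemma whileA_eq (K : Int) (xs : List Int) (k n d : Nat) (hK : K = (k : Int)) :
    ∀ (c l : Nat) (st : Int × Int × Int), l + d + c = n →
      pvWhileA c (n : Int) K xs (l : Int) (((l + d : Nat) : Nat) : Int) st
        = (List.range c).foldl (fun st t => stepA xs k st d (l + t)) st := by
  intro c
  induction c with
  | zero => intro l st h; simp [pvWhileA]
  | succ c ih =>
    intro l st h
    have hlt : ((l + d : Nat) : Int) < (n : Int) := by exact_mod_cast (by omega : l + d < n)
    have e1 : ((l + d : Nat) : Int) + 1 = ((l + d + 1 : Nat) : Int) := by push_cast; ring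
    have e2 : ((l + d : Nat) : Int) - (l : Int) = (d : Int) := by push_cast; ring
    have e3 : ((l : Int) + 1) = ((l + 1 : Nat) : Int) := by push_cast; ring
    have e4 : ((l + d + 1 : Nat) : Int) = (((l + 1) + d : Nat) : Int) := by push_cast; ring
    have hst' :
        (if PySem.Set.len (PySem.Set.ofList (PySem.List.slice xs (some (l : Int)) (some (((l + d : Nat) : Int) + 1)))) = K then
          if ((l + d : Nat) : Int) - (l : Int) < st.1 then
            (((l + d : Nat) : Int) - (l : Int), (l : Int) + 1, ((l + d : Nat) : Int) + 1)
          else st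
        else st) = stepA xs k st d l := by
      rw [e1, e2, PySem.List.slice_natCast, hK]
      unfold stepA dct
      simp only [PySem.Set.len]
      norm_num [Nat.cast_inj]
    show (if ((l + d : Nat) : Int) < (n : Int) then _ else _) = _
    rw [if_pos hlt]
    show pvWhileA c (n : Int) K xs ((l : Int) + 1) (((l + d : Nat) : Int) + 1) _ = _
    rw [hst', e3, e1, e4, ih (l + 1) (stepA xs k st d l) (by omega)]
    rw [List.range_succ_eq_map, List.foldl_cons, List.foldl_map]
    have hfun : (fun (st : Int × Int × Int) (t : Nat) => stepA xs k st d (l + Nat.succ t))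
        = fun st t => stepA xs k st d (l + 1 + t) := by
      funext st t
      rw [show l + Nat.succ t = l + 1 + t from by omega]
    rw [hfun]
    simp

lemma stepA_opt (xs : List Int) (k n d j : Nat) (hj : j + d < n)
    (r : Option (Nat × Nat))
    (hr : OptIn xs k n (fun d' l' => d' < d ∨ (d' = d ∧ l' < j)) r) :
    ∃ r', stepA xs k (stOf (n : Int) r) d j = stOf (n : Int) r' ∧
      OptIn xs k n (fun d' l' => d' < d ∨ (d' = d ∧ l' < j + 1)) r' := by
  unfold stepA
  by_cases hg : dct xs j (j + d) = k
  · have hokN : okW xs k n d j := ⟨hj, hg⟩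
    rw [if_pos hg]
    rcases hr with ⟨hr, hnone⟩ | ⟨d₀, l₀, hr, hP, hok, hmin⟩
    · subst hr
      have hcond : (d : Int) < (stOf (n : Int) none).1 := by
        show (d : Int) < (n : Int) + 1
        exact_mod_cast (by omega : d < n + 1)
      rw [if_pos hcond]
      refine ⟨some (d, j), rfl, Or.inr ⟨d, j, rfl, Or.inr ⟨rfl, by omega⟩, hokN, ?_⟩⟩
      intro d' l' hP' hok'
      rcases hP' with h' | ⟨hde, h'⟩
      · exact absurd hok' (hnone d' l' (Or.inl h'))
      · subst hde
        by_cases hl : l' < j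
        · exact absurd hok' (hnone d' l' (Or.inr ⟨rfl, hl⟩))
        · exact Or.inr ⟨rfl, by omega⟩
    · subst hr
      have hd0 : d₀ ≤ d := by rcases hP with h | ⟨h, _⟩ <;> omega
      have hcond : ¬ (d : Int) < (stOf (n : Int) (some (d₀, l₀))).1 := by
        show ¬ (d : Int) < (d₀ : Int)
        exact_mod_cast (by omega : ¬ d < d₀)
      rw [if_neg hcond]
      refine ⟨some (d₀, l₀), rfl, Or.inr ⟨d₀, l₀, rfl, ?_, hok, ?_⟩⟩
      · rcases hP with h | ⟨h, h2⟩
        · exact Or.inl h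
        · exact Or.inr ⟨h, by omega⟩
      · intro d' l' hP' hok'
        rcases hP' with h' | ⟨hde, h'⟩
        · exact hmin d' l' (Or.inl h') hok'
        · subst hde
          by_cases hl : l' < j
          · exact hmin d' l' (Or.inr ⟨rfl, hl⟩) hok'
          · have hlj : l' = j := by omega
            subst hlj
            simp only [lexLE]
            rcases hP with h | ⟨h, h2⟩ <;> omega
  · rw [if_neg hg]
    refine ⟨r, rfl, ?_⟩
    rcases hr with ⟨hr, hnone⟩ | ⟨d₀, l₀, hr, hP, hok, hmin⟩
    · refine Or.inl ⟨hr, ?_⟩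
      intro d' l' hP' hok'
      rcases hP' with h' | ⟨hde, h'⟩
      · exact hnone d' l' (Or.inl h') hok'
      · subst hde
        by_cases hl : l' < j
        · exact hnone d' l' (Or.inr ⟨rfl, hl⟩) hok'
        · have hlj : l' = j := by omega
          subst hlj
          exact hg hok'.2
    · refine Or.inr ⟨d₀, l₀, hr, ?_, hok, ?_⟩
      · rcases hP with h | ⟨h, h2⟩
        · exact Or.inl h
        · exact Or.inr ⟨h, by omega⟩
      · intro d' l' hP' hok'
        rcases hP' with h' | ⟨hde, h'⟩
        · exact hmin d' l' (Or.inl h') hok'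
        · subst hde
          by_cases hl : l' < j
          · exact hmin d' l' (Or.inr ⟨rfl, hl⟩) hok'
          · have hlj : l' = j := by omega
            subst hlj
            exact absurd hok'.2 hg

lemma foldA_inner (xs : List Int) (k n d : Nat) :
    ∀ (c j : Nat) (r : Option (Nat × Nat)), j + c + d ≤ n →
      OptIn xs k n (fun d' l' => d' < d ∨ (d' = d ∧ l' < j)) r →
      ∃ r', (List.range c).foldl (fun st t => stepA xs k st d (j + t)) (stOf (n : Int) r)
              = stOf (n : Int) r' ∧
            OptIn xs k n (fun d' l' => d' < d ∨ (d' = d ∧ l' < j + c)) r' := by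
  intro c
  induction c with
  | zero => exact fun j r _ hr => ⟨r, rfl, hr⟩
  | succ c ih =>
    intro j r hc hr
    obtain ⟨r1, h1, hr1⟩ := stepA_opt xs k n d j (by omega) r hr
    rw [List.range_succ_eq_map, List.foldl_cons, List.foldl_map]
    rw [show j + 0 = j from rfl, h1]
    have hfun : (fun (st : Int × Int × Int) (t : Nat) => stepA xs k st d (j + Nat.succ t))
        = fun st t => stepA xs k st d (j + 1 + t) := by
      funext st t
      rw [show j + Nat.succ t = j + 1 + t from by omega]
    rw [hfun]
    obtain ⟨r', h', hr'⟩ := ih (j + 1) r1 (by omega) hr1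
    refine ⟨r', h', OptIn_congr xs k n _ _ (fun d' l' _ => by omega) r' hr'⟩

lemma foldA_outer (xs : List Int) (k n : Nat) :
    ∀ (c m : Nat) (r : Option (Nat × Nat)), c ≤ n - m →
      OptIn xs k n (fun d' _ => d' < m) r →
      ∃ r', (List.range c).foldl
              (fun st t => (List.range (n - (m + t))).foldl
                (fun st u => stepA xs k st (m + t) (0 + u)) st) (stOf (n : Int) r)
              = stOf (n : Int) r' ∧
            OptIn xs k n (fun d' _ => d' < m + c) r' := by
  intro c
  induction c with
  | zero => exact fun m r _ hr => ⟨r, rfl, hr⟩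
  | succ c ih =>
    intro m r hc hr
    rw [List.range_succ_eq_map, List.foldl_cons, List.foldl_map]
    have hr0 : OptIn xs k n (fun d' l' => d' < m ∨ (d' = m ∧ l' < 0)) r :=
      OptIn_congr xs k n _ _ (fun d' l' _ => by omega) r hr
    obtain ⟨r1, h1, hr1⟩ := foldA_inner xs k n m (n - (m + 0)) 0 r (by omega) hr0
    rw [show m + 0 = m from rfl] at h1 hr1 ⊢
    rw [show (0 : Nat) + (n - m) = n - m from by omega] at hr1
    rw [h1]
    have hr1' : OptIn xs k n (fun d' _ => d' < m + 1) r1 := by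
      refine OptIn_congr xs k n _ _ (fun d' l' hok => ?_) r1 hr1
      have h2 := hok.1
      constructor
      · rintro (h | ⟨h, _⟩) <;> omega
      · intro h
        by_cases hd : d' < m
        · exact Or.inl hd
        · exact Or.inr ⟨by omega, by omega⟩
    have hfun : (fun (st : Int × Int × Int) (t : Nat) =>
          (List.range (n - (m + Nat.succ t))).foldl
            (fun st u => stepA xs k st (m + Nat.succ t) (0 + u)) st)
        = fun st t => (List.range (n - (m + 1 + t))).foldl
            (fun st u => stepA xs k st (m + 1 + t) (0 + u)) st := by
      funext st t
      rw [show m + Nat.succ t = m + 1 + t from by omega]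
    rw [hfun]
    obtain ⟨r', h', hr'⟩ := ih (m + 1) r1 (by omega) hr1'
    refine ⟨r', h', OptIn_congr xs k n _ _ (fun d' l' _ => by omega) r' hr'⟩

lemma A_char (K : Int) (xs : List Int) (k n : Nat) (hK : K = (k : Int)) (hk : 1 ≤ k) :
    ∃ r, slow_sol (n : Int) K xs = outA r ∧ OptIn xs k n (fun _ _ => True) r := by
  have hK1 : K - 1 = ((k - 1 : Nat) : Int) := by omega
  have hcnt : ((n : Int) - ((k - 1 : Nat) : Int)).toNat = n - (k - 1) := by omega
  obtain ⟨r', h', hr'⟩ := foldA_outer xs k n (n - (k - 1)) (k - 1) none (by omega)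
    (Or.inl ⟨rfl, fun d l hP hok => by have := ok_k_le xs k n d l hok; omega⟩)
  have hfold : (PySem.List.pyRange (K - 1) (n : Int) 1).foldl
      (fun st i => pvWhileA ((n : Int) - i).toNat (n : Int) K xs 0 i st) ((n : Int) + 1, -1, -1)
      = stOf (n : Int) r' := by
    rw [hK1, PySem.List.pyRange_one, hcnt, List.foldl_map]
    rw [PySem.List.foldl_congr_mem _ _
      (fun st t => (List.range (n - ((k - 1) + t))).foldl
        (fun st u => stepA xs k st ((k - 1) + t) (0 + u)) st) _ ?_]
    · exact h'
    · intro st t ht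
      have htn : (k - 1) + t < n := by simp only [List.mem_range] at ht; omega
      have ec : (((k - 1 : Nat) : Int) + (t : Int)) = (((k - 1) + t : Nat) : Int) := by push_cast; ring
      have ef : ((n : Int) - (((k - 1) + t : Nat) : Int)).toNat = n - ((k - 1) + t) := by omega
      show pvWhileA ((n : Int) - (((k - 1 : Nat) : Int) + (t : Int))).toNat (n : Int) K xs 0
          (((k - 1 : Nat) : Int) + (t : Int)) st = _
      rw [ec, ef]
      have hw := whileA_eq K xs k n ((k - 1) + t) hK (n - ((k - 1) + t)) 0 st (by omega)
      rw [show (0 : Nat) + ((k - 1) + t) = (k - 1) + t from by omega] at hw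
      exact hw
  refine ⟨r', ?_, OptIn_congr xs k n _ _ (fun d l hok => by
      have h1 := hok.1
      have h2 := ok_k_le xs k n d l hok
      exact ⟨fun _ => trivial, fun _ => by omega⟩) r' hr'⟩
  simp only [slow_sol]
  rw [hfold]
  rcases r' with _ | ⟨d, l⟩ <;> rfl

lemma nodup_subset_length {α : Type} [DecidableEq α] (s t : List α) (h : s.Nodup)
    (hsub : s ⊆ t) : s.length ≤ t.length :=
  calc s.length = s.toFinset.card := (List.toFinset_card_of_nodup h).symm
    _ ≤ t.toFinset.card := Finset.card_le_card (fun x hx => by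
        rw [List.mem_toFinset] at *; exact hsub hx)
    _ ≤ t.length := t.toFinset_card_le

lemma dct_le_total (xs : List Int) (n l r : Nat) (hr : r < n) :
    dct xs l r ≤ (PySem.Set.ofList (xs.take n)).length := by
  apply nodup_subset_length _ _ (PySem.Set.nodup_ofList _)
  intro x hx
  have hx1 : x ∈ (xs.drop l).take (r + 1 - l) := (PySem.Set.mem_ofList _ _).mp hx
  have hx2 : x ∈ ((xs.take n).drop l).take (r + 1 - l) := by
    rw [List.drop_take, List.take_take, min_eq_left (by omega)]
    exact hx1
  exact (PySem.Set.mem_ofList _ _).mpr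
    (List.drop_subset _ _ (List.take_subset _ _ hx2))

lemma findRF_spec (xs : List Int) (k n l : Nat) :
    ∀ (c r : Nat), r + c = n →
      (match findRF xs k c l r with
       | some r0 => r ≤ r0 ∧ r0 < n ∧ dct xs l r0 = k ∧
           ∀ r', r ≤ r' → r' < r0 → dct xs l r' ≠ k
       | none => ∀ r', r ≤ r' → r' < n → dct xs l r' ≠ k) := by
  intro c
  induction c with
  | zero => intro r h r' h1 h2; omega
  | succ c ih =>
    intro r h
    by_cases hg : dct xs l r = k
    · simp only [findRF, if_pos hg]
      exact ⟨Nat.le_refl r, by omega, hg, fun r' h1 h2 => by omega⟩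
    · simp only [findRF, if_neg hg]
      have hrec := ih (r + 1) (by omega)
      rcases hfr : findRF xs k c l (r + 1) with _ | r0 <;> rw [hfr] at hrec
      · intro r' h1 h2
        by_cases hr' : r' = r
        · subst hr'; exact hg
        · exact hrec r' (by omega) h2
      · obtain ⟨ha, hb, hc2, hd⟩ := hrec
        refine ⟨by omega, hb, hc2, fun r' h1 h2 => ?_⟩
        by_cases hr' : r' = r
        · subst hr'; exact hg
        · exact hd r' (by omega) h2

lemma innerB_char (K : Int) (xs : List Int) (k n : Nat) (hK : K = (k : Int))
    (hn : n ≤ xs.length) (l : Nat) :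
    ∀ (c r : Nat) (seen : PySem.Set Int) (best : Option (Int × Int)), r + c = n → l ≤ r →
      seen = PySem.Set.ofList ((xs.drop l).take (r - l)) →
      pvInnerB K xs (l : Int) (PySem.List.pyRange (r : Int) (n : Int) 1) seen best
        = match findRF xs k c l r with
          | none => best
          | some r0 => updB best (((r0 - l : Nat) : Int), (l : Int)) := by
  intro c
  induction c with
  | zero =>
    intro r seen best h hlr hseen
    rw [PySem.List.pyRange_one_eq_nil (by exact_mod_cast (by omega : n ≤ r))]
    rfl
  | succ c ih =>
    intro r seen best h hlr hseen
    have hrn : r < n := by omega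
    have hrlen : r < xs.length := by omega
    rw [PySem.List.pyRange_one_cons (by exact_mod_cast hrn)]
    have hget : PySem.List.pyGetD xs (r : Int) 0 = xs[r] := by
      rw [PySem.List.pyGetD_natCast]; exact List.getD_eq_getElem xs 0 hrlen
    have hseen' : PySem.Set.add seen (PySem.List.pyGetD xs (r : Int) 0)
        = PySem.Set.ofList ((xs.drop l).take (r + 1 - l)) := by
      rw [hget, hseen, ← PySem.Set.ofList_append_singleton, ← window_succ xs l r hlr hrlen]
    show (if PySem.Set.len (PySem.Set.add seen (PySem.List.pyGetD xs (r : Int) 0)) = K then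
        (match best with
         | none => some ((r : Int) - (l : Int), (l : Int))
         | some b => if (r : Int) - (l : Int) < b.1 then some ((r : Int) - (l : Int), (l : Int)) else some b)
      else pvInnerB K xs (l : Int) (PySem.List.pyRange ((r : Int) + 1) (n : Int) 1)
            (PySem.Set.add seen (PySem.List.pyGetD xs (r : Int) 0)) best) = _
    rw [hseen']
    have hlen : (PySem.Set.len (PySem.Set.ofList ((xs.drop l).take (r + 1 - l))) = K) ↔ dct xs l r = k := by
      simp [PySem.Set.len, hK, dct, Nat.cast_inj]
    have ecast : (r : Int) - (l : Int) = ((r - l : Nat) : Int) := by omega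
    by_cases hg : dct xs l r = k
    · rw [if_pos (hlen.mpr hg)]
      simp only [findRF, if_pos hg]
      rcases best with _ | b
      · show some ((r : Int) - (l : Int), (l : Int)) = some (((r - l : Nat) : Int), (l : Int))
        rw [ecast]
      · show (if (r : Int) - (l : Int) < b.1 then some ((r : Int) - (l : Int), (l : Int)) else some b)
            = updB (some b) (((r - l : Nat) : Int), (l : Int))
        rw [ecast]; rfl
    · rw [if_neg (fun hc => hg (hlen.mp hc))]
      simp only [findRF, if_neg hg]
      rw [show ((r : Int) + 1) = ((r + 1 : Nat) : Int) from by push_cast; ring]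
      exact ih (r + 1) _ best (by omega) (by omega) rfl

lemma stepB_opt (xs : List Int) (k n j : Nat) (hj : j < n)
    (r : Option (Nat × Nat))
    (hr : OptIn xs k n (fun _ l' => l' < j) r) :
    ∃ r', stepB xs k n (bOf r) j = bOf r' ∧ OptIn xs k n (fun _ l' => l' < j + 1) r' := by
  unfold stepB
  have hspec := findRF_spec xs k n j (n - j) j (by omega)
  rcases hfr : findRF xs k (n - j) j j with _ | r0 <;> rw [hfr] at hspec
  · refine ⟨r, rfl, ?_⟩
    have hnoj : ∀ d', ¬ okW xs k n d' j :=
      fun d' hok => hspec (j + d') (by omega) hok.1 hok.2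
    rcases hr with ⟨hr0, hnone⟩ | ⟨d₀, l₀, hr0, hP, hok, hmin⟩
    · refine Or.inl ⟨hr0, fun d' l' hP' hok' => ?_⟩
      by_cases hl : l' < j
      · exact hnone d' l' hl hok'
      · have hlj : l' = j := by omega
        subst hlj; exact hnoj d' hok'
    · refine Or.inr ⟨d₀, l₀, hr0, by omega, hok, fun d' l' hP' hok' => ?_⟩
      by_cases hl : l' < j
      · exact hmin d' l' hl hok'
      · have hlj : l' = j := by omega
        subst hlj; exact absurd hok' (hnoj d')
  · obtain ⟨hle, hlt, hdk, hmin0⟩ := hspec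
    have hokN : okW xs k n (r0 - j) j :=
      ⟨by omega, by rw [show j + (r0 - j) = r0 from by omega]; exact hdk⟩
    have hminj : ∀ d', okW xs k n d' j → r0 - j ≤ d' := by
      intro d' hok
      by_contra hcon
      exact hmin0 (j + d') (by omega) (by omega) hok.2
    rcases hr with ⟨hr0, hnone⟩ | ⟨d₀, l₀, hr0, hP, hok, hmin⟩
    · subst hr0
      refine ⟨some (r0 - j, j), rfl, Or.inr ⟨r0 - j, j, rfl, by omega, hokN, ?_⟩⟩
      intro d' l' hP' hok'
      by_cases hl : l' < j
      · exact absurd hok' (hnone d' l' hl)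
      · have hlj : l' = j := by omega
        subst hlj
        have := hminj d' hok'
        simp only [lexLE]; omega
    · subst hr0
      by_cases hcmp : r0 - j < d₀
      · refine ⟨some (r0 - j, j), ?_, Or.inr ⟨r0 - j, j, rfl, by omega, hokN, ?_⟩⟩
        · show (if ((r0 - j : Nat) : Int) < (d₀ : Int) then
              some (((r0 - j : Nat) : Int), (j : Int)) else some ((d₀ : Int), (l₀ : Int)))
              = bOf (some (r0 - j, j))
          rw [if_pos (by exact_mod_cast hcmp)]; rfl
        · intro d' l' hP' hok'
          by_cases hl : l' < j
          · have := hmin d' l' hl hok'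
            simp only [lexLE] at this ⊢; omega
          · have hlj : l' = j := by omega
            subst hlj
            have := hminj d' hok'
            simp only [lexLE]; omega
      · refine ⟨some (d₀, l₀), ?_, Or.inr ⟨d₀, l₀, rfl, by omega, hok, ?_⟩⟩
        · show (if ((r0 - j : Nat) : Int) < (d₀ : Int) then
              some (((r0 - j : Nat) : Int), (j : Int)) else some ((d₀ : Int), (l₀ : Int)))
              = bOf (some (d₀, l₀))
          rw [if_neg (by exact_mod_cast hcmp)]; rfl
        · intro d' l' hP' hok'
          by_cases hl : l' < j
          · exact hmin d' l' hl hok'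
          · have hlj : l' = j := by omega
            subst hlj
            have := hminj d' hok'
            simp only [lexLE]; omega

lemma foldB_outer (xs : List Int) (k n : Nat) :
    ∀ (c j : Nat) (r : Option (Nat × Nat)), j + c ≤ n →
      OptIn xs k n (fun _ l' => l' < j) r →
      ∃ r', (List.range c).foldl (fun best t => stepB xs k n best (j + t)) (bOf r) = bOf r' ∧
            OptIn xs k n (fun _ l' => l' < j + c) r' := by
  intro c
  induction c with
  | zero => exact fun j r _ hr => ⟨r, rfl, hr⟩
  | succ c ih =>
    intro j r hc hr
    obtain ⟨r1, h1, hr1⟩ := stepB_opt xs k n j (by omega) r hr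
    rw [List.range_succ_eq_map, List.foldl_cons, List.foldl_map]
    rw [show j + 0 = j from rfl, h1]
    have hfun : (fun (best : Option (Int × Int)) (t : Nat) => stepB xs k n best (j + Nat.succ t))
        = fun best t => stepB xs k n best (j + 1 + t) := by
      funext best t
      rw [show j + Nat.succ t = j + 1 + t from by omega]
    rw [hfun]
    obtain ⟨r', h', hr'⟩ := ih (j + 1) r1 (by omega) hr1
    refine ⟨r', h', OptIn_congr xs k n _ _ (fun d' l' _ => by omega) r' hr'⟩

lemma B_char (K : Int) (xs : List Int) (k n : Nat) (hK : K = (k : Int))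
    (hn : n ≤ xs.length)
    (hg : ¬ K > PySem.Set.len (PySem.Set.ofList (PySem.List.slice xs none (some (n : Int))))) :
    ∃ r, slow_sol_alt (n : Int) K xs = outA r ∧ OptIn xs k n (fun _ _ => True) r := by
  obtain ⟨r', h', hr'⟩ := foldB_outer xs k n n 0 none (by omega)
    (Or.inl ⟨rfl, fun d l hP _ => absurd hP (by omega)⟩)
  have hfold : (PySem.List.pyRange 0 (n : Int) 1).foldl
      (fun best l => pvInnerB K xs l (PySem.List.pyRange l (n : Int) 1) PySem.Set.empty best) none
      = bOf r' := by
    rw [PySem.List.pyRange_zero, show ((n : Int)).toNat = n from by omega, List.foldl_map]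
    rw [PySem.List.foldl_congr_mem _ _ (fun best t => stepB xs k n best t) _ ?_]
    · have hfun : (fun (best : Option (Int × Int)) (t : Nat) => stepB xs k n best (0 + t))
          = fun best t => stepB xs k n best t := by
        funext best t
        rw [Nat.zero_add]
      rw [← hfun]
      exact h'
    · intro best t ht
      have htn : t < n := by simp only [List.mem_range] at ht; exact ht
      have hseen : PySem.Set.empty = PySem.Set.ofList ((xs.drop t).take (t - t)) := by
        rw [Nat.sub_self]
        rfl
      show pvInnerB K xs (t : Int) (PySem.List.pyRange (t : Int) (n : Int) 1)
          PySem.Set.empty best = stepB xs k n best t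
      rw [innerB_char K xs k n hK hn t (n - t) t PySem.Set.empty best (by omega) (by omega) hseen]
      rfl
  refine ⟨r', ?_, OptIn_congr xs k n _ _
    (fun d l hok => ⟨fun _ => trivial, fun _ => by have := hok.1; omega⟩) r' hr'⟩
  simp only [slow_sol_alt]
  rw [if_neg hg, hfold]
  rcases r' with _ | ⟨d, l⟩ <;> rfl

lemma foldl_const {α β : Type} (l : List α) (init : β) :
    l.foldl (fun st _ => st) init = init := by
  induction l generalizing init with
  | nil => rfl
  | cons x t ih => exact ih init

lemma len_nonneg {α : Type} (s : PySem.Set α) : 0 ≤ PySem.Set.len s := by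
  simp [PySem.Set.len]

lemma whileA_neg (K : Int) (hK : K < 0) (N : Int) (xs : List Int) :
    ∀ (fuel : Nat) (left right : Int) (st : Int × Int × Int),
      pvWhileA fuel N K xs left right st = st := by
  intro fuel
  induction fuel with
  | zero => intro left right st; rfl
  | succ f ih =>
    intro left right st
    simp only [pvWhileA]
    split_ifs with h h1 h2
    · exfalso
      have := len_nonneg (PySem.Set.ofList (PySem.List.slice xs (some left) (some (right + 1))))
      omega
    · exfalso
      have := len_nonneg (PySem.Set.ofList (PySem.List.slice xs (some left) (some (right + 1))))
      omega
    · exact ih (left + 1) (right + 1) st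
    · rfl

lemma innerB_neg (K : Int) (hK : K < 0) (xs : List Int) (left : Int) :
    ∀ (rights : List Int) (seen : PySem.Set Int) (best : Option (Int × Int)),
      pvInnerB K xs left rights seen best = best := by
  intro rights
  induction rights with
  | nil => intro seen best; rfl
  | cons r rest ih =>
    intro seen best
    simp only [pvInnerB]
    split_ifs with h1
    · exfalso
      have := len_nonneg (PySem.Set.add seen (PySem.List.pyGetD xs r 0))
      omega
    · exact ih _ best

-- ===== VERDICT (by name: the statement is the Claim_ definition above) =====
theorem slow_sol_spec : Claim_equal_slow_sol := by
  intro N K xs _ hPre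
  obtain ⟨hN, hK1⟩ := hPre
  unfold Spec_slow_sol
  have hlen0 : ∀ (M : Int), 0 ≤ PySem.Set.len (PySem.Set.ofList (PySem.List.slice xs none (some M))) :=
    fun M => len_nonneg _
  by_cases hKneg : K < 0
  · -- K < 0: no window ever has a negative distinct count, so both return (-1, -1)
    have hA : (PySem.List.pyRange (K - 1) N 1).foldl
        (fun st i => pvWhileA (N - i).toNat N K xs 0 i st) (N + 1, -1, -1) = (N + 1, -1, -1) := by
      rw [PySem.List.foldl_congr_mem _ _ (fun st _ => st) _
        (fun st i _ => whileA_neg K hKneg N xs _ 0 i st)]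
      exact foldl_const _ _
    have hB : (PySem.List.pyRange 0 N 1).foldl
        (fun best l => pvInnerB K xs l (PySem.List.pyRange l N 1) PySem.Set.empty best)
        (none : Option (Int × Int)) = none := by
      rw [PySem.List.foldl_congr_mem _ _ (fun best _ => best) _
        (fun best l _ => innerB_neg K hKneg xs l _ PySem.Set.empty best)]
      exact foldl_const _ _
    show slow_sol N K xs = slow_sol_alt N K xs
    simp only [slow_sol, slow_sol_alt]
    rw [if_neg (by have := hlen0 N; omega), hA, hB]
  · by_cases h0 : N < 0
    · have hA : PySem.List.pyRange (K - 1) N 1 = [] := PySem.List.pyRange_one_eq_nil (by omega)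
      have hB : PySem.List.pyRange 0 N 1 = [] := PySem.List.pyRange_one_eq_nil (by omega)
      simp [slow_sol, slow_sol_alt, hA, hB]
    · have hNn : N = ((N.toNat : Nat) : Int) := by omega
      have hKk : K = ((K.toNat : Nat) : Int) := by omega
      have hkk : 1 ≤ K.toNat := by omega
      have hnlen : N.toNat ≤ xs.length := by omega
      have hD_eq : PySem.Set.len (PySem.Set.ofList (PySem.List.slice xs none (some N)))
          = ((PySem.Set.ofList (xs.take N.toNat)).length : Int) := by
        rw [PySem.List.slice_to _ (by omega : (0 : Int) ≤ N)]
        simp [PySem.Set.len]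
      obtain ⟨r, hA, hrA⟩ := A_char K xs K.toNat N.toNat hKk hkk
      by_cases hDK : K > PySem.Set.len (PySem.Set.ofList (PySem.List.slice xs none (some N)))
      · -- K exceeds the distinct count of the whole prefix: no window qualifies
        have hrnone : r = none := by
          rcases hrA with ⟨hr0, _⟩ | ⟨d, l, hr0, _, hok, _⟩
          · exact hr0
          · exfalso
            have h1 := dct_le_total xs N.toNat l (l + d) hok.1
            rw [hok.2] at h1
            rw [hD_eq] at hDK
            omega
        subst hrnone
        rw [hNn] at hDK
        rw [hNn, hA]
        show outA none = slow_sol_alt ((N.toNat : Nat) : Int) K xs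
        simp only [slow_sol_alt]
        rw [if_pos hDK]
        rfl
      · have hg : ¬ K > PySem.Set.len
            (PySem.Set.ofList (PySem.List.slice xs none (some ((N.toNat : Nat) : Int)))) := by
          rw [← hNn]; exact hDK
        obtain ⟨r', hB, hrB⟩ := B_char K xs K.toNat N.toNat hKk hnlen hg
        rw [hNn, hA, hB, OptIn_unique xs K.toNat N.toNat _ r r' hrA hrB]
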